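-- pv_equiv track=rewrite | github.com/johansebas28/toolezi | routes/convert.py | normalize_vertical_table
-- ===== SOURCE A (Python) =====
-- def normalize_vertical_table(rows):
--     """
--     Convierte columnas verticales en filas horizontales
--     """
--     new_rows = []
--     temp = []
--
--     for r in rows:
--         if len(r) == 1:
--             temp.append(r[0])
--
--             # cada 3 elementos → crear fila
--             if len(temp) == 3:
--                 new_rows.append(temp)
--                 temp = []
--         else:
--             if temp:
--                 new_rows.append(temp)
--                 temp = []
--             new_rows.append(r)
--
--     if temp:
--         new_rows.append(temp)
--
--     return new_rows
-- ===== SOURCE B (Python) =====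
-- def normalize_vertical_table(rows):
--     """
--     Convierte columnas verticales en filas horizontales
--     (run-based rewrite: split into maximal runs of singleton rows, chunk each run by 3)
--     """
--     out = []
--     i = 0
--     n = len(rows)
--     while i < n:
--         r = rows[i]
--         if len(r) == 1:
--             j = i + 1
--             while j < n and len(rows[j]) == 1:
--                 j += 1
--             vals = [x[0] for x in rows[i:j]]
--             while vals:
--                 out.append(vals[:3])
--                 vals = vals[3:]
--             i = j
--         else:
--             out.append(r)
--             i += 1
--     return out
-- ===== Notes on version B (the rewrite author's own statement) =====
-- stated objective: alternative
-- what changed: Replaces A's single fold that threads a 3-element buffer (with flush-on-3 and flush-on-non-singleton) by a run-based pass: split rows into maximal runs of singleton rows, chunk each run's values into groups of three, and copy non-singleton rows through unchanged.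
import Mathlib
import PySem

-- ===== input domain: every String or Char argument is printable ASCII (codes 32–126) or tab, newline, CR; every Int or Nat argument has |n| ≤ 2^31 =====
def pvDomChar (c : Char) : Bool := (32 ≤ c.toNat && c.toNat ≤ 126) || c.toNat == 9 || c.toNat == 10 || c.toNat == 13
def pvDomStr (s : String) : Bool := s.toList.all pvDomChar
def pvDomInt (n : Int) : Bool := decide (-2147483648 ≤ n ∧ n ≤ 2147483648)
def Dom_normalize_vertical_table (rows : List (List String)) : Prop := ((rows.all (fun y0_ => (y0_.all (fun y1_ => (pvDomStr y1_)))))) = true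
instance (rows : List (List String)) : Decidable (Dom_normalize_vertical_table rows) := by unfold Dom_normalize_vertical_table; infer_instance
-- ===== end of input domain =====

-- B groups the rows into maximal runs of singleton rows and chunks each run by 3
-- (objective: simpler/alternative decomposition); A threads a triple buffer through one fold.

-- ===== PORT A =====
-- A's loop, state = (new_rows, temp); r[0] is guarded by len(r) == 1 so the .getD "" default is never used
def nvtAStep (st : List (List String) × List String) (r : List String) :
    List (List String) × List String :=
  let (new_rows, temp) := st
  if r.length == 1 then
    let temp' := temp ++ [(PySem.List.pyGet? r 0).getD ""]
    if temp'.length == 3 then (new_rows ++ [temp'], []) else (new_rows, temp')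
  else
    let new_rows' := if temp ≠ [] then new_rows ++ [temp] else new_rows
    (new_rows' ++ [r], [])

def normalize_vertical_table (rows : List (List String)) : List (List String) :=
  let st := rows.foldl nvtAStep ([], [])
  if st.2 ≠ [] then st.1 ++ [st.2] else st.1

-- ===== PORT B =====
-- inner `while vals: out.append(vals[:3]); vals = vals[3:]`
def nvtChunk3 : List String → List (List String)
  | [] => []
  | v :: vs => (v :: vs).take 3 :: nvtChunk3 ((v :: vs).drop 3)
termination_by l => l.length
decreasing_by simp

def normalize_vertical_table_alt : List (List String) → List (List String)
  | [] => []
  | r :: rest =>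
    if r.length == 1 then
      let run := rest.takeWhile (fun x => x.length == 1)
      nvtChunk3 ((r :: run).map (fun x => (PySem.List.pyGet? x 0).getD ""))
        ++ normalize_vertical_table_alt (rest.drop run.length)
    else r :: normalize_vertical_table_alt rest
termination_by rows => rows.length
decreasing_by
  · simp
  · simp

-- ===== PRECONDITION & SPEC =====
def Spec_normalize_vertical_table (rows : List (List String)) (out : List (List String)) : Prop := out = normalize_vertical_table_alt rows
instance (rows : List (List String)) (out : List (List String)) : Decidable (Spec_normalize_vertical_table rows out) := by unfold Spec_normalize_vertical_table; infer_instance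

-- ===== CLAIM (what is proved, stated in full; the proofs are below) =====
def Claim_equal_normalize_vertical_table : Prop := ∀ (rows : List (List String)), Dom_normalize_vertical_table rows → Spec_normalize_vertical_table rows (normalize_vertical_table rows)

-- ===== LEMMAS AND PROOFS =====

-- A, re-stated as a recursion over rows carrying the pending temp buffer
def nvtH (temp : List String) (rows : List (List String)) : List (List String) :=
  match rows with
  | [] => if temp ≠ [] then [temp] else []
  | r :: rest =>
    if r.length == 1 then
      let temp' := temp ++ [(PySem.List.pyGet? r 0).getD ""]
      if temp'.length == 3 then temp' :: nvtH [] rest else nvtH temp' rest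
    else (if temp ≠ [] then [temp] else []) ++ r :: nvtH [] rest

theorem nvtA_loop (rows : List (List String)) (acc : List (List String)) (temp : List String) :
    (let st := rows.foldl nvtAStep (acc, temp)
     if st.2 ≠ [] then st.1 ++ [st.2] else st.1) = acc ++ nvtH temp rows := by
  induction rows generalizing acc temp with
  | nil => simp [nvtH]; split <;> simp
  | cons r rest ih =>
    simp only [List.foldl_cons, nvtH, nvtAStep]
    by_cases h : r.length == 1
    · by_cases h3 : temp.length = 2
      · simp [h, h3, ih, List.append_assoc]
      · simp [h, h3, ih]
    · simp only [h, if_neg, Bool.false_eq_true, not_false_iff]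
      rw [ih]
      split <;> simp [List.append_assoc]

-- B with a pending buffer prefixed to the leading singleton run
def nvtP (temp : List String) (rows : List (List String)) : List (List String) :=
  nvtChunk3 (temp ++ (rows.takeWhile (fun x => x.length == 1)).map
      (fun x => (PySem.List.pyGet? x 0).getD ""))
    ++ normalize_vertical_table_alt
        (rows.drop (rows.takeWhile (fun x => x.length == 1)).length)

theorem nvtChunk3_nil : nvtChunk3 [] = [] := by
  rw [nvtChunk3]

theorem nvtChunk3_cons (v : String) (vs : List String) :
    nvtChunk3 (v :: vs) = (v :: vs).take 3 :: nvtChunk3 ((v :: vs).drop 3) := by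
  rw [nvtChunk3]

theorem chunk3_append3 (p m : List String) (hp : p.length = 3) :
    nvtChunk3 (p ++ m) = p :: nvtChunk3 m := by
  rcases p with _ | ⟨a, _ | ⟨b, _ | ⟨c, _ | ⟨d, t⟩⟩⟩⟩ <;> simp_all
  simp [nvtChunk3_cons]

theorem alt_eq_nvtP (rows : List (List String)) :
    normalize_vertical_table_alt rows = nvtP [] rows := by
  cases rows with
  | nil => simp [nvtP, normalize_vertical_table_alt, nvtChunk3_nil]
  | cons r rest =>
    by_cases h : r.length == 1
    · simp [nvtP, normalize_vertical_table_alt, h]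
    · simp [nvtP, normalize_vertical_table_alt, h, nvtChunk3_nil]

theorem chunk3_small (l : List String) (h : l.length ≤ 3) :
    nvtChunk3 l = if l ≠ [] then [l] else [] := by
  cases l with
  | nil => simp [nvtChunk3]
  | cons v vs =>
    simp only [nvtChunk3]
    have ht : (v :: vs).take 3 = v :: vs := List.take_of_length_le h
    have hd : (v :: vs).drop 3 = [] := List.drop_eq_nil_of_le h
    simp [ht, hd, nvtChunk3]

theorem nvtH_eq_nvtP (rows : List (List String)) (temp : List String)
    (h : temp.length ≤ 2) : nvtH temp rows = nvtP temp rows := by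
  induction rows generalizing temp with
  | nil =>
    simp only [nvtH, nvtP, List.takeWhile_nil, List.map_nil, List.append_nil, List.drop_nil,
      normalize_vertical_table_alt, List.append_nil]
    exact (chunk3_small temp (by omega)).symm
  | cons r rest ih =>
    by_cases hr : r.length == 1
    · simp only [nvtH, nvtP, hr, if_pos, List.takeWhile_cons, List.map_cons]
      set v := (PySem.List.pyGet? r 0).getD "" with hv
      by_cases h3 : (temp ++ [v]).length == 3
      · have h3' : (temp ++ [v]).length = 3 := by simpa using h3
        simp only [h3, if_pos]
        rw [ih [] (by simp)]
        simp only [nvtP]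
        have h3'' : (temp ++ [v]).length = 3 := by simpa using h3
        rw [show temp ++ v :: (rest.takeWhile (fun x => x.length == 1)).map
                (fun x => (PySem.List.pyGet? x 0).getD "") =
            (temp ++ [v]) ++ (rest.takeWhile (fun x => x.length == 1)).map
                (fun x => (PySem.List.pyGet? x 0).getD "") by simp]
        rw [chunk3_append3 _ _ h3'']
        simp
      · have h3' : (temp ++ [v]).length ≤ 2 := by
          simp only [List.length_append, List.length_cons, List.length_nil] at h3 ⊢
          rcases Nat.lt_or_ge (temp.length + 1) 3 with hlt | hge
          · omega
          · exfalso; exact h3 (by simp; omega)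
        simp only [h3, if_neg, Bool.false_eq_true, not_false_iff]
        rw [ih _ h3']
        simp [nvtP]
    · have halt : normalize_vertical_table_alt (r :: rest) = r :: normalize_vertical_table_alt rest := by
        simp [normalize_vertical_table_alt, hr]
      simp only [nvtH, nvtP, hr, List.takeWhile_cons, Bool.false_eq_true, if_false,
        List.map_nil, List.append_nil, List.length_nil, List.drop_zero]
      rw [ih [] (by simp), ← alt_eq_nvtP, halt, chunk3_small temp (by omega)]

-- ===== VERDICT (by name: the statement is the Claim_ definition above) =====
theorem normalize_vertical_table_spec : Claim_equal_normalize_vertical_table := by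
  intro rows _
  show normalize_vertical_table rows = normalize_vertical_table_alt rows
  have := nvtA_loop rows [] []
  simp only [List.nil_append] at this
  rw [normalize_vertical_table, this, nvtH_eq_nvtP rows [] (by simp), alt_eq_nvtP]
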